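-- pv_equiv track=rewrite | github.com/AlfRonDon/NeuraReport | backend/tests/test_endpoint_wiring.py | _make_testable_path
-- ===== SOURCE A (Python) =====
-- def _make_testable_path(path: str) -> str:
--     """Replace path parameters with test dummy values."""
--     replacements = {
--         "{template_id}": "test-tpl-000",
--         "{connection_id}": "test-conn-000",
--         "{job_id}": "test-job-000",
--         "{schedule_id}": "test-sched-000",
--         "{document_id}": "test-doc-000",
--         "{dashboard_id}": "test-dash-000",
--         "{widget_id}": "test-widget-000",
--         "{spreadsheet_id}": "test-ss-000",
--         "{sheet_id}": "test-sheet-000",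
--         "{session_id}": "test-sess-000",
--         "{message_id}": "test-msg-000",
--         "{task_id}": "test-task-000",
--         "{analysis_id}": "test-analysis-000",
--         "{version}": "1",
--         "{comment_id}": "test-comment-000",
--         "{diagram_id}": "test-diagram-000",
--         "{kit_id}": "test-kit-000",
--         "{theme_id}": "test-theme-000",
--         "{asset_id}": "test-asset-000",
--         "{schema_id}": "test-schema-000",
--         "{doc_id}": "test-doc-000",
--         "{coll_id}": "test-coll-000",
--         "{tag_id}": "test-tag-000",
--         "{query_id}": "test-query-000",
--         "{entry_id}": "test-entry-000",
--         "{source_id}": "test-source-000",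
--         "{search_id}": "test-search-000",
--         "{run_id}": "test-run-000",
--         "{workflow_id}": "test-wf-000",
--         "{execution_id}": "test-exec-000",
--         "{connector_type}": "postgresql",
--         "{entity_type}": "template",
--         "{entity_id}": "test-entity-000",
--         "{notification_id}": "test-notif-000",
--         "{report_id}": "test-report-000",
--         "{share_id}": "test-share-000",
--         "{chart_id}": "test-chart-000",
--         "{mode}": "brief",
--         "{key}": "test-key",
--         "{id}": "test-user-000",
--         "{category}": "database",
--         "{pipeline_id}": "test-pipeline-000",
--         "{connection_id}": "test-conn-000",
--         "{integration_id}": "test-int-000",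
--         "{webhook_id}": "test-webhook-000",
--         "{watcher_id}": "test-watcher-000",
--         "{snapshot_id}": "test-snap-000",
--         "{filter_id}": "test-filter-000",
--         "{variable_name}": "test-var",
--         "{token_id}": "test-token-000",
--         "{trigger_id}": "test-trigger-000",
--         "{node_type}": "transform",
--         "{format_id}": "test-format-000",
--         "{pivot_id}": "test-pivot-000",
--         "{account_id}": "test-account-000",
--         "{versionId}": "1",
--         "{commentId}": "test-comment-000",
--         "{templateId}": "test-tpl-000",
--     }
--     result = path
--     for param, value in replacements.items():
--         result = result.replace(param, value)
--     return result
-- ===== SOURCE B (Python) =====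
-- def _make_testable_path(path: str) -> str:
--     """Replace path parameters with test dummy values."""
--     # The replacement table lives in plain "key value" text lines, parsed once.
--     table = {}
--     for line in _TABLE:
--         key, _, value = line.partition(" ")
--         table[key] = value
--     # One left-to-right pass: at each '{' try to read a brace-free
--     # "{param}" token and look it up; everything else is copied.
--     out = []
--     i = 0
--     n = len(path)
--     while i < n:
--         c = path[i]
--         if c == "{":
--             j = i + 1
--             while j < n and path[j] != "{" and path[j] != "}":
--                 j += 1
--             if j < n and path[j] == "}" and j > i + 1:
--                 tok = path[i : j + 1]
--                 out.append(table.get(tok, tok))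
--                 i = j + 1
--                 continue
--         out.append(c)
--         i += 1
--     return "".join(out)
--
--
-- _TABLE = (
--     "{template_id} test-tpl-000",
--     "{connection_id} test-conn-000",
--     "{job_id} test-job-000",
--     "{schedule_id} test-sched-000",
--     "{document_id} test-doc-000",
--     "{dashboard_id} test-dash-000",
--     "{widget_id} test-widget-000",
--     "{spreadsheet_id} test-ss-000",
--     "{sheet_id} test-sheet-000",
--     "{session_id} test-sess-000",
--     "{message_id} test-msg-000",
--     "{task_id} test-task-000",
--     "{analysis_id} test-analysis-000",
--     "{version} 1",
--     "{comment_id} test-comment-000",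
--     "{diagram_id} test-diagram-000",
--     "{kit_id} test-kit-000",
--     "{theme_id} test-theme-000",
--     "{asset_id} test-asset-000",
--     "{schema_id} test-schema-000",
--     "{doc_id} test-doc-000",
--     "{coll_id} test-coll-000",
--     "{tag_id} test-tag-000",
--     "{query_id} test-query-000",
--     "{entry_id} test-entry-000",
--     "{source_id} test-source-000",
--     "{search_id} test-search-000",
--     "{run_id} test-run-000",
--     "{workflow_id} test-wf-000",
--     "{execution_id} test-exec-000",
--     "{connector_type} postgresql",
--     "{entity_type} template",
--     "{entity_id} test-entity-000",
--     "{notification_id} test-notif-000",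
--     "{report_id} test-report-000",
--     "{share_id} test-share-000",
--     "{chart_id} test-chart-000",
--     "{mode} brief",
--     "{key} test-key",
--     "{id} test-user-000",
--     "{category} database",
--     "{pipeline_id} test-pipeline-000",
--     "{integration_id} test-int-000",
--     "{webhook_id} test-webhook-000",
--     "{watcher_id} test-watcher-000",
--     "{snapshot_id} test-snap-000",
--     "{filter_id} test-filter-000",
--     "{variable_name} test-var",
--     "{token_id} test-token-000",
--     "{trigger_id} test-trigger-000",
--     "{node_type} transform",
--     "{format_id} test-format-000",
--     "{pivot_id} test-pivot-000",
--     "{account_id} test-account-000",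
--     "{versionId} 1",
--     "{commentId} test-comment-000",
--     "{templateId} test-tpl-000",
-- )
-- ===== Notes on version B (the rewrite author's own statement) =====
-- stated objective: alternative
-- what changed: A runs 57 sequential whole-string str.replace passes over a dict literal; B stores the table as a plain text blob parsed once into a dict and then makes a single left-to-right scan over the path, reading each brace-delimited '{param}' token once and substituting it via one dict lookup.
-- intended difference: On inputs containing the substring '{{entity_type}Id}', A's sequential passes cascade: replacing {entity_type} with 'template' creates a new token {templateId} which a later pass also replaces (A yields 'test-tpl-000' at that spot), while B substitutes only tokens present in the input and returns '{templateId}' there, the intended behaviour since the created token is an accident of A's pass-per-key order. — e.g. on _make_testable_path("{{entity_type}Id}"): A returns "test-tpl-000", B returns "{templateId}"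
import Mathlib
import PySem

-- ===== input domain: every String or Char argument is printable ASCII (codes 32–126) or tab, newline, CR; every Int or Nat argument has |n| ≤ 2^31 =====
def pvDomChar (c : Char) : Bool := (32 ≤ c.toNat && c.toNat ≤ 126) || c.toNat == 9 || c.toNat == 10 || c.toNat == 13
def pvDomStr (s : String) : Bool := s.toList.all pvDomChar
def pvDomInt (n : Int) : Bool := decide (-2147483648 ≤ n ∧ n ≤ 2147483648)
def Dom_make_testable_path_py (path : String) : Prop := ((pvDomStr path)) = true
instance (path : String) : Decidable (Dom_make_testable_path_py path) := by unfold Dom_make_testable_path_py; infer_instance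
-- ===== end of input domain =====

-- B keeps the replacement table as a text blob parsed once and substitutes every "{param}"
-- token in one left-to-right scan, instead of A's 57 whole-string replace passes
-- (alternative algorithm and data representation, same cost).
-- ===== PORT A =====
-- The source dict literal repeats the key "{connection_id}" with the identical value; the
-- evaluated Python dict therefore has these 57 items in this order.
def replPairs : List (String × String) := [
  ("{template_id}", "test-tpl-000"), ("{connection_id}", "test-conn-000"),
  ("{job_id}", "test-job-000"), ("{schedule_id}", "test-sched-000"),
  ("{document_id}", "test-doc-000"), ("{dashboard_id}", "test-dash-000"),
  ("{widget_id}", "test-widget-000"), ("{spreadsheet_id}", "test-ss-000"),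
  ("{sheet_id}", "test-sheet-000"), ("{session_id}", "test-sess-000"),
  ("{message_id}", "test-msg-000"), ("{task_id}", "test-task-000"),
  ("{analysis_id}", "test-analysis-000"), ("{version}", "1"),
  ("{comment_id}", "test-comment-000"), ("{diagram_id}", "test-diagram-000"),
  ("{kit_id}", "test-kit-000"), ("{theme_id}", "test-theme-000"),
  ("{asset_id}", "test-asset-000"), ("{schema_id}", "test-schema-000"),
  ("{doc_id}", "test-doc-000"), ("{coll_id}", "test-coll-000"),
  ("{tag_id}", "test-tag-000"), ("{query_id}", "test-query-000"),
  ("{entry_id}", "test-entry-000"), ("{source_id}", "test-source-000"),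
  ("{search_id}", "test-search-000"), ("{run_id}", "test-run-000"),
  ("{workflow_id}", "test-wf-000"), ("{execution_id}", "test-exec-000"),
  ("{connector_type}", "postgresql"), ("{entity_type}", "template"),
  ("{entity_id}", "test-entity-000"), ("{notification_id}", "test-notif-000"),
  ("{report_id}", "test-report-000"), ("{share_id}", "test-share-000"),
  ("{chart_id}", "test-chart-000"), ("{mode}", "brief"),
  ("{key}", "test-key"), ("{id}", "test-user-000"),
  ("{category}", "database"), ("{pipeline_id}", "test-pipeline-000"),
  ("{integration_id}", "test-int-000"), ("{webhook_id}", "test-webhook-000"),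
  ("{watcher_id}", "test-watcher-000"), ("{snapshot_id}", "test-snap-000"),
  ("{filter_id}", "test-filter-000"), ("{variable_name}", "test-var"),
  ("{token_id}", "test-token-000"), ("{trigger_id}", "test-trigger-000"),
  ("{node_type}", "transform"), ("{format_id}", "test-format-000"),
  ("{pivot_id}", "test-pivot-000"), ("{account_id}", "test-account-000"),
  ("{versionId}", "1"), ("{commentId}", "test-comment-000"),
  ("{templateId}", "test-tpl-000")]

def make_testable_path_py (path : String) : String :=
  ((PySem.Dict.mk replPairs).items).foldl (fun r pv => PySem.Str.replace r pv.1 pv.2) path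

-- ===== PORT B =====
-- Source B's _TABLE tuple, verbatim; each line is "key value".
def bLines : List String := [
  "{template_id} test-tpl-000",
  "{connection_id} test-conn-000",
  "{job_id} test-job-000",
  "{schedule_id} test-sched-000",
  "{document_id} test-doc-000",
  "{dashboard_id} test-dash-000",
  "{widget_id} test-widget-000",
  "{spreadsheet_id} test-ss-000",
  "{sheet_id} test-sheet-000",
  "{session_id} test-sess-000",
  "{message_id} test-msg-000",
  "{task_id} test-task-000",
  "{analysis_id} test-analysis-000",
  "{version} 1",
  "{comment_id} test-comment-000",
  "{diagram_id} test-diagram-000",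
  "{kit_id} test-kit-000",
  "{theme_id} test-theme-000",
  "{asset_id} test-asset-000",
  "{schema_id} test-schema-000",
  "{doc_id} test-doc-000",
  "{coll_id} test-coll-000",
  "{tag_id} test-tag-000",
  "{query_id} test-query-000",
  "{entry_id} test-entry-000",
  "{source_id} test-source-000",
  "{search_id} test-search-000",
  "{run_id} test-run-000",
  "{workflow_id} test-wf-000",
  "{execution_id} test-exec-000",
  "{connector_type} postgresql",
  "{entity_type} template",
  "{entity_id} test-entity-000",
  "{notification_id} test-notif-000",
  "{report_id} test-report-000",
  "{share_id} test-share-000",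
  "{chart_id} test-chart-000",
  "{mode} brief",
  "{key} test-key",
  "{id} test-user-000",
  "{category} database",
  "{pipeline_id} test-pipeline-000",
  "{integration_id} test-int-000",
  "{webhook_id} test-webhook-000",
  "{watcher_id} test-watcher-000",
  "{snapshot_id} test-snap-000",
  "{filter_id} test-filter-000",
  "{variable_name} test-var",
  "{token_id} test-token-000",
  "{trigger_id} test-trigger-000",
  "{node_type} transform",
  "{format_id} test-format-000",
  "{pivot_id} test-pivot-000",
  "{account_id} test-account-000",
  "{versionId} 1",
  "{commentId} test-comment-000",
  "{templateId} test-tpl-000"]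

-- line.partition(" ") of Source B: key before the first space, value after it
def bParseLine (l : List Char) : List Char × List Char :=
  (l.takeWhile (fun c => !(c == ' ')), (l.dropWhile (fun c => !(c == ' '))).drop 1)

def bTable : List (List Char × List Char) :=
  bLines.map (fun s => bParseLine s.toList)

def nbChar (c : Char) : Bool := !(c == '{' || c == '}')

def bLook (P : List (List Char × List Char)) (tok : List Char) : List Char :=
  match P.find? (fun p => p.1 == tok) with
  | some p => p.2
  | none => tok

def bGo (P : List (List Char × List Char)) : List Char → List Char
  | [] => []
  | c :: rest =>
    if c = '{' then
      let t := rest.takeWhile nbChar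
      let r := rest.drop t.length
      if r.head? = some '}' ∧ t ≠ [] then
        bLook P ('{' :: (t ++ ['}'])) ++ bGo P r.tail
      else c :: bGo P rest
    else c :: bGo P rest
  termination_by l => l.length
  decreasing_by
  · rename_i hh
    have h1 : r.length ≤ rest.length := by
      show (rest.drop _).length ≤ _; simp
    have h2 : r ≠ [] := by
      intro hnil; rw [hnil] at hh; simp at hh
    have h3 : r.length ≠ 0 := by simpa [List.length_eq_zero_iff] using h2
    have h4 : (List.drop (List.takeWhile nbChar rest).length rest).tail.length
        = (List.drop (List.takeWhile nbChar rest).length rest).length - 1 :=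
      List.length_tail
    have h5 : (List.drop (List.takeWhile nbChar rest).length rest).length ≤ rest.length := by simp
    have h6 : (List.drop (List.takeWhile nbChar rest).length rest).length ≠ 0 := h3
    simp only [List.length_cons]
    omega
  · simp
  · simp

def make_testable_path_py_alt (path : String) : String :=
  String.ofList (bGo bTable path.toList)

-- ===== PRECONDITION & SPEC =====
-- On inputs containing "{{entity_type}Id}", A's sequential replaces cascade: substituting
-- {entity_type} -> template creates a new token {templateId} which A then also replaces,
-- while B substitutes only tokens present in the input; B's value is the intended one
-- since a created token is an accident of A's pass-per-key order.
def D_make_testable_path_py (path : String) : Prop :=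
  PySem.Str.isIn "{{entity_type}Id}" path = true
instance (path : String) : Decidable (D_make_testable_path_py path) := by
  unfold D_make_testable_path_py; infer_instance

def Spec_make_testable_path_py (path : String) (out : String) : Prop :=
  ¬ D_make_testable_path_py path → out = make_testable_path_py_alt path
instance (path : String) (out : String) : Decidable (Spec_make_testable_path_py path out) := by
  unfold Spec_make_testable_path_py; infer_instance

def pvDiffWitness_make_testable_path_py : String := "{{entity_type}Id}"
def pvDiffWitnessOut_make_testable_path_py : String × String := ("test-tpl-000", "{templateId}")

-- ===== CLAIM (what is proved, stated in full; the proofs are below) =====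
def Claim_unchanged_make_testable_path_py : Prop := ∀ (path : String), Dom_make_testable_path_py path → Spec_make_testable_path_py path (make_testable_path_py path)
def Claim_changed_make_testable_path_py : Prop := Dom_make_testable_path_py (pvDiffWitness_make_testable_path_py) ∧ D_make_testable_path_py (pvDiffWitness_make_testable_path_py) ∧ make_testable_path_py (pvDiffWitness_make_testable_path_py) = pvDiffWitnessOut_make_testable_path_py.1 ∧ make_testable_path_py_alt (pvDiffWitness_make_testable_path_py) = pvDiffWitnessOut_make_testable_path_py.2 ∧ pvDiffWitnessOut_make_testable_path_py.1 ≠ pvDiffWitnessOut_make_testable_path_py.2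

def Claim_exact_make_testable_path_py : Prop := ∀ (path : String), Dom_make_testable_path_py path → D_make_testable_path_py path → make_testable_path_py path ≠ make_testable_path_py_alt path

-- ===== LEMMAS AND PROOFS =====
set_option maxRecDepth 1000000
set_option maxHeartbeats 2000000

-- B's parsed blob table is, pairwise, exactly A's dict items (keys and values as char lists)
theorem tableEq : replPairs.map (fun p => (p.1.toList, p.2.toList)) = bTable := by decide

theorem bGo_nil (P : List (List Char × List Char)) : bGo P [] = [] := by rw [bGo]

theorem bGo_cons_ne (P : List (List Char × List Char)) (c : Char) (rest : List Char)
    (h : ¬ c = '{') : bGo P (c :: rest) = c :: bGo P rest := by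
  rw [bGo]; simp [h]

theorem bGo_succ (P : List (List Char × List Char)) (t rest' : List Char)
    (ht : t.all nbChar = true) (htne : t ≠ []) :
    bGo P ('{' :: (t ++ '}' :: rest')) = bLook P ('{' :: (t ++ ['}'])) ++ bGo P rest' := by
  have h1 : (t ++ '}' :: rest').takeWhile nbChar = t := by
    rw [List.takeWhile_append]
    have h2 : ∀ x ∈ t, nbChar x = true := fun x hx => List.all_eq_true.mp ht x hx
    simp only [List.takeWhile_eq_self_iff.mpr h2]
    simp [nbChar]
  have h3 : (t ++ '}' :: rest').drop t.length = '}' :: rest' := by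
    simp
  rw [bGo]
  simp only [h1, h3, if_pos rfl]
  simp [htne]

theorem bGo_fail (P : List (List Char × List Char)) (rest : List Char)
    (h : ¬ ((rest.drop (rest.takeWhile nbChar).length).head? = some '}'
            ∧ rest.takeWhile nbChar ≠ [])) :
    bGo P ('{' :: rest) = '{' :: bGo P rest := by
  rw [bGo]; simp only [if_neg h]; simp

-- single replacement, structural form of PySem.Chars.replace for a nonempty pattern
def repl1 (o : Char) (w v : List Char) : List Char → List Char
  | [] => []
  | c :: s => if (o :: w).isPrefixOf (c :: s) then v ++ repl1 o w v (s.drop w.length)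
              else c :: repl1 o w v s
  termination_by l => l.length
  decreasing_by
  · have : (s.drop w.length).length ≤ s.length := by simp
    simp only [List.length_cons]; omega
  · simp

theorem replace_go_eq (o : Char) (w v : List Char) :
    ∀ (fuel : Nat) (l acc : List Char), l.length ≤ fuel →
      PySem.Chars.replace.go (o :: w) v fuel l acc = acc.reverse ++ repl1 o w v l := by
  intro fuel
  induction fuel with
  | zero =>
    intro l acc h
    have : l = [] := by cases l <;> simp_all
    subst this
    simp [PySem.Chars.replace.go, repl1]
  | succ f ih =>
    intro l acc h
    cases l with
    | nil => simp [PySem.Chars.replace.go, repl1]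
    | cons c s =>
      rw [PySem.Chars.replace.go]
      by_cases hp : (o :: w).isPrefixOf (c :: s) = true
      · rw [if_pos hp]
        have hlen : (List.drop (o :: w).length (c :: s)).length ≤ f := by
          simp at h ⊢; omega
        rw [ih _ _ hlen]
        rw [repl1, if_pos hp]
        simp [List.drop]
      · rw [if_neg hp]
        have hlen : s.length ≤ f := by simp at h; omega
        rw [ih _ _ hlen]
        rw [repl1, if_neg hp]
        simp

theorem replace_eq_repl1 (o : Char) (w v s : List Char) :
    PySem.Chars.replace s (o :: w) v = repl1 o w v s := by
  rw [PySem.Chars.replace]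
  simp only [List.isEmpty_cons, Bool.false_eq_true, if_false]
  exact replace_go_eq o w v s.length s [] le_rfl

theorem repl1_nil (o : Char) (w v : List Char) : repl1 o w v [] = [] := by rw [repl1]

theorem repl1_cons_neg (o : Char) (w v : List Char) (c : Char) (s : List Char)
    (h : ¬ (o :: w) <+: (c :: s)) :
    repl1 o w v (c :: s) = c :: repl1 o w v s := by
  rw [repl1, if_neg (by simpa [List.isPrefixOf_iff_prefix] using h)]

theorem repl1_match (o : Char) (w v s : List Char) :
    repl1 o w v ((o :: w) ++ s) = v ++ repl1 o w v s := by
  rw [List.cons_append, repl1]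
  rw [if_pos (by simp [List.isPrefixOf_iff_prefix])]
  simp

theorem repl1_bf_append (w v : List Char) (a : List Char) (ha : a.all nbChar = true) :
    ∀ s, repl1 '{' w v (a ++ s) = a ++ repl1 '{' w v s := by
  induction a with
  | nil => simp
  | cons c a' ih =>
    intro s
    have hc : nbChar c = true := by simp only [List.all_cons, Bool.and_eq_true] at ha; exact ha.1
    have ha' : a'.all nbChar = true := by simp only [List.all_cons, Bool.and_eq_true] at ha; exact ha.2
    have hne : ¬ ('{' :: w) <+: (c :: (a' ++ s)) := by
      intro hpre
      have := List.cons_prefix_cons.mp hpre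
      simp [nbChar] at hc
      exact hc.1 this.1.symm
    rw [List.cons_append, repl1_cons_neg _ _ _ _ _ hne, ih ha']
    simp

theorem repl1_rbrace (w v : List Char) (s : List Char) :
    repl1 '{' w v ('}' :: s) = '}' :: repl1 '{' w v s := by
  apply repl1_cons_neg
  intro hpre
  have := List.cons_prefix_cons.mp hpre
  exact absurd this.1.symm (by decide)

theorem prefix_through_bf (a : List Char) :
    ∀ x y : List Char, a.all nbChar = true → (x ++ ['}']) <+: (a ++ y) →
      a <+: x ∧ ((x.drop a.length) ++ ['}']) <+: y := by
  induction a with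
  | nil => intro x y _ h; simpa using h
  | cons c a' ih =>
    intro x y ha h
    have hc : nbChar c = true := by simp only [List.all_cons, Bool.and_eq_true] at ha; exact ha.1
    have ha' : a'.all nbChar = true := by simp only [List.all_cons, Bool.and_eq_true] at ha; exact ha.2
    cases x with
    | nil =>
      simp only [List.nil_append, List.cons_append] at h
      have := (List.cons_prefix_cons.mp h).1
      simp [nbChar, ← this] at hc
    | cons d x' =>
      simp only [List.cons_append] at h
      have h2 := List.cons_prefix_cons.mp h
      obtain ⟨ih1, ih2⟩ := ih x' y ha' h2.2
      exact ⟨List.cons_prefix_cons.mpr ⟨h2.1.symm, ih1⟩, by simpa using ih2⟩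

theorem tok_prefix_eq (t' : List Char) :
    ∀ t x : List Char, t'.all nbChar = true → t.all nbChar = true →
      (t' ++ ['}']) <+: (t ++ '}' :: x) → t' = t := by
  induction t' with
  | nil =>
    intro t x _ ht h
    cases t with
    | nil => rfl
    | cons c t2 =>
      simp only [List.nil_append, List.cons_append] at h
      have := (List.cons_prefix_cons.mp h).1
      have hc : nbChar c = true := by simp only [List.all_cons, Bool.and_eq_true] at ht; exact ht.1
      simp [nbChar, ← this] at hc
  | cons c t2 ih =>
    intro t x ht' ht h
    have hc : nbChar c = true := by simp only [List.all_cons, Bool.and_eq_true] at ht'; exact ht'.1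
    have ht2 : t2.all nbChar = true := by simp only [List.all_cons, Bool.and_eq_true] at ht'; exact ht'.2
    cases t with
    | nil =>
      simp only [List.cons_append, List.nil_append] at h
      have := (List.cons_prefix_cons.mp h).1
      simp [nbChar, this] at hc
    | cons d t3 =>
      simp only [List.cons_append] at h
      have h2 := List.cons_prefix_cons.mp h
      have ht3 : t3.all nbChar = true := by simp only [List.all_cons, Bool.and_eq_true] at ht; exact ht.2
      rw [h2.1, ih t3 x ht2 ht3 h2.2]

theorem bGo_brace_cases (P : List (List Char × List Char)) (rest : List Char) :
    (∃ t r', t.all nbChar = true ∧ t ≠ [] ∧ rest = t ++ '}' :: r' ∧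
       bGo P ('{' :: rest) = bLook P ('{' :: (t ++ ['}'])) ++ bGo P r') ∨
    bGo P ('{' :: rest) = '{' :: bGo P rest := by
  by_cases h : ((rest.drop (rest.takeWhile nbChar).length).head? = some '}'
      ∧ rest.takeWhile nbChar ≠ [])
  · left
    obtain ⟨h1, h2⟩ := h
    set t := rest.takeWhile nbChar with htdef
    set r := rest.drop t.length with hrdef
    have hr : r = '}' :: r.tail := by
      cases hr : r with
      | nil => rw [hr] at h1; simp at h1
      | cons a b => rw [hr] at h1; simp at h1; simp [h1]
    have hrest : rest = t ++ '}' :: r.tail := by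
      have htake : rest.take t.length = t := by
        rw [htdef]
        exact (List.prefix_iff_eq_take.mp (List.takeWhile_prefix (p := nbChar))).symm
      conv_lhs => rw [← List.take_append_drop t.length rest]
      rw [htake, ← hrdef, ← hr]
    refine ⟨t, r.tail, List.all_eq_true.mpr (fun x hx => List.mem_takeWhile_imp hx), h2, hrest, ?_⟩
    rw [hrest]
    exact bGo_succ P t r.tail (List.all_eq_true.mpr (fun x hx => List.mem_takeWhile_imp hx)) h2
  · right
    exact bGo_fail P rest h

def GoodP (p : List Char × List Char) : Prop :=
  (∃ t, p.1 = '{' :: (t ++ ['}']) ∧ t.all nbChar = true ∧ t ≠ []) ∧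
    p.2.all nbChar = true ∧ p.2 ≠ []

theorem bGo_bf_append (P : List (List Char × List Char)) (a : List Char)
    (ha : a.all nbChar = true) : ∀ r, bGo P (a ++ r) = a ++ bGo P r := by
  induction a with
  | nil => simp
  | cons c a' ih =>
    intro r
    have hc : nbChar c = true := by simp only [List.all_cons, Bool.and_eq_true] at ha; exact ha.1
    have ha' : a'.all nbChar = true := by simp only [List.all_cons, Bool.and_eq_true] at ha; exact ha.2
    have hcne : ¬ c = '{' := by simp [nbChar] at hc; exact hc.1
    rw [List.cons_append, bGo_cons_ne P c _ hcne, ih ha']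
    simp

theorem bGo_table_nil : ∀ (n : Nat) (s : List Char), s.length ≤ n → bGo [] s = s := by
  intro n
  induction n with
  | zero =>
    intro s h
    have : s = [] := by cases s <;> simp_all
    subst this; exact bGo_nil []
  | succ m ih =>
    intro s h
    cases s with
    | nil => exact bGo_nil []
    | cons c rest =>
      by_cases hc : c = '{'
      · subst hc
        rcases bGo_brace_cases [] rest with ⟨t, r', ht, htne, hrest, heq⟩ | heq
        · rw [heq]
          have hlook : bLook [] ('{' :: (t ++ ['}'])) = '{' :: (t ++ ['}']) := by
            simp [bLook]
          have hr' : r'.length ≤ m := by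
            subst hrest; simp at h; omega
          rw [hlook, ih r' hr', hrest]
          simp
        · rw [heq, ih rest (by simp at h; omega)]
      · rw [bGo_cons_ne [] c rest hc, ih rest (by simp at h; omega)]

theorem bGo_prefix_step (P : List (List Char × List Char))
    (hgood : ∀ p ∈ P, GoodP p) (c : Char) (X : List Char) (hc : ¬ c = '{')
    (hv : ∀ p ∈ P, ¬ (p.2 <+: (c :: X)) ∧ ¬ ((c :: X) <+: p.2)) :
    ∀ u, (c :: X) <+: bGo P u → ∃ u', u = c :: u' ∧ X <+: bGo P u' := by
  intro u hpre
  cases u with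
  | nil => rw [bGo_nil] at hpre; exact absurd (List.prefix_nil.mp hpre) (by simp)
  | cons d u₂ =>
    by_cases hd : d = '{'
    · subst hd
      rcases bGo_brace_cases P u₂ with ⟨t, r', ht, htne, hrest, heq⟩ | heq
      · rw [heq] at hpre
        cases hfind : P.find? (fun p => p.1 == ('{' :: (t ++ ['}']))) with
        | none =>
          rw [bLook, hfind] at hpre
          simp only [List.cons_append] at hpre
          exact absurd (List.cons_prefix_cons.mp hpre).1 hc
        | some p =>
          have hmem : p ∈ P := List.mem_of_find?_eq_some hfind
          rw [bLook, hfind] at hpre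
          rcases Nat.le_total (c :: X).length p.2.length with hle | hle
          · have : (c :: X) <+: p.2 :=
              List.prefix_of_prefix_length_le hpre (List.prefix_append p.2 _) hle
            exact absurd this (hv p hmem).2
          · have : p.2 <+: (c :: X) :=
              List.prefix_of_prefix_length_le (List.prefix_append p.2 _) hpre hle
            exact absurd this (hv p hmem).1
      · rw [heq] at hpre
        exact absurd (List.cons_prefix_cons.mp hpre).1 hc
    · rw [bGo_cons_ne P d u₂ hd] at hpre
      have h2 := List.cons_prefix_cons.mp hpre
      exact ⟨u₂, by rw [h2.1], h2.2⟩

theorem drop_takeWhile_eq_dropWhile (p : Char → Bool) (l : List Char) :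
    l.drop (l.takeWhile p).length = l.dropWhile p := by
  induction l with
  | nil => simp
  | cons c l' ih =>
    by_cases h : p c
    · simp [List.takeWhile_cons, List.dropWhile_cons, h, ih]
    · simp [List.takeWhile_cons, List.dropWhile_cons, h]

theorem take_takeWhile_self (p : Char → Bool) (l : List Char) :
    l.take (l.takeWhile p).length = l.takeWhile p :=
  (List.prefix_iff_eq_take.mp (List.takeWhile_prefix (p := p))).symm

theorem head_drop_takeWhile_false (p : Char → Bool) (l : List Char) (d : Char)
    (h : (l.drop (l.takeWhile p).length).head? = some d) : p d = false := by
  rw [drop_takeWhile_eq_dropWhile] at h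
  have := List.head?_dropWhile_not p l
  rw [h] at this
  simpa using this

theorem keyOf_inj (a b : List Char) (h : '{' :: (a ++ ['}']) = '{' :: (b ++ ['}'])) : a = b := by
  have h2 := List.cons_injective.eq_iff.mp h
  exact List.append_cancel_right h2

theorem REP (t v : List Char) (ht : t.all nbChar = true) (htne : t ≠ [])
    (hvbf : v.all nbChar = true)
    (P : List (List Char × List Char)) (hgood : ∀ p ∈ P, GoodP p)
    (hnew : ∀ p ∈ P, p.1 ≠ '{' :: (t ++ ['}'])) :
    ∀ (n : Nat) (s : List Char), s.length ≤ n →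
      (∀ p ∈ P, ∀ t0 u, t0.all nbChar = true →
        ('{' :: (t0 ++ p.1 ++ u)) <:+: s →
        ¬ ((t ++ ['}']) <+: (t0 ++ (p.2 ++ bGo P u)))) →
      repl1 '{' (t ++ ['}']) v (bGo P s) = bGo (P ++ [('{' :: (t ++ ['}']), v)]) s := by
  intro n
  induction n with
  | zero =>
    intro s hlen _
    have : s = [] := by cases s <;> simp_all
    subst this
    rw [bGo_nil, bGo_nil, repl1_nil]
  | succ m ih =>
    intro s hlen hC
    cases s with
    | nil => rw [bGo_nil, bGo_nil, repl1_nil]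
    | cons c s₁ =>
      have hCtail : ∀ s₂ : List Char, s₂ <:+ (c :: s₁) →
          (∀ p ∈ P, ∀ t0 u, t0.all nbChar = true →
            ('{' :: (t0 ++ p.1 ++ u)) <:+: s₂ →
            ¬ ((t ++ ['}']) <+: (t0 ++ (p.2 ++ bGo P u)))) := by
        intro s₂ hsuf p hp t0 u h1 h2
        exact hC p hp t0 u h1 (h2.trans hsuf.isInfix)
      by_cases hc : c = '{'
      swap
      · -- literal character
        rw [bGo_cons_ne P c s₁ hc, bGo_cons_ne _ c s₁ hc]
        rw [repl1_cons_neg _ _ _ _ _ (by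
          intro hpre
          exact hc (List.cons_prefix_cons.mp hpre).1.symm)]
        rw [ih s₁ (by simp at hlen; omega) (hCtail s₁ (List.suffix_cons c s₁))]
      · subst hc
        by_cases hcond : ((s₁.drop (s₁.takeWhile nbChar).length).head? = some '}'
            ∧ s₁.takeWhile nbChar ≠ [])
        · -- token case
          set t0 := s₁.takeWhile nbChar with ht0def
          have ht0bf : t0.all nbChar = true :=
            List.all_eq_true.mpr (fun x hx => List.mem_takeWhile_imp hx)
          set r' := (s₁.drop t0.length).tail with hr'def
          have hrest : s₁ = t0 ++ '}' :: r' := by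
            have hr : s₁.drop t0.length = '}' :: r' := by
              cases hr2 : s₁.drop t0.length with
              | nil => rw [ht0def] at hr2; rw [hr2] at hcond; simp at hcond
              | cons a b =>
                have : a = '}' := by
                  have := hcond.1
                  rw [ht0def] at hr2
                  rw [hr2] at this; simp at this; exact this
                subst this
                rw [hr'def, ht0def, hr2]
                rfl
            conv_lhs => rw [← List.take_append_drop t0.length s₁]
            rw [take_takeWhile_self, ← ht0def, hr]
          have hr'len : r'.length ≤ m := by
            rw [hrest] at hlen; simp at hlen; omega
          have hr'suf : r' <:+ ('{' :: s₁) := by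
            rw [hrest]
            refine ⟨'{' :: t0 ++ ['}'], ?_⟩
            simp
          rw [hrest, bGo_succ P t0 r' ht0bf hcond.2, bGo_succ _ t0 r' ht0bf hcond.2]
          cases hfind : P.find? (fun p => p.1 == ('{' :: (t0 ++ ['}']))) with
          | some p =>
            have hmem : p ∈ P := List.mem_of_find?_eq_some hfind
            have hp2bf : p.2.all nbChar = true := (hgood p hmem).2.1
            have hfind2 : (P ++ [('{' :: (t ++ ['}']), v)]).find?
                (fun p => p.1 == ('{' :: (t0 ++ ['}']))) = some p := by
              rw [List.find?_append, hfind]; rfl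
            rw [bLook, bLook, hfind, hfind2]
            simp only
            rw [repl1_bf_append _ _ _ hp2bf]
            rw [ih r' hr'len (hCtail r' hr'suf)]
          | none =>
            by_cases heq : t0 = t
            · subst heq
              have hfind2 : (P ++ [('{' :: (t0 ++ ['}']), v)]).find?
                  (fun p => p.1 == ('{' :: (t0 ++ ['}']))) = some ('{' :: (t0 ++ ['}']), v) := by
                rw [List.find?_append, hfind]
                simp
              rw [bLook, bLook, hfind, hfind2]
              simp only
              rw [repl1_match]
              rw [ih r' hr'len (hCtail r' hr'suf)]
            · have hfind2 : (P ++ [('{' :: (t ++ ['}']), v)]).find?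
                  (fun p => p.1 == ('{' :: (t0 ++ ['}']))) = none := by
                rw [List.find?_append, hfind]
                simp only [Option.none_or]
                rw [List.find?_eq_none]
                intro q hq
                simp only [List.mem_singleton] at hq
                subst hq
                simp only [beq_eq_false_iff_ne, ne_eq]
                intro hkeq
                exact heq (keyOf_inj t t0 (beq_iff_eq.mp hkeq)).symm
              rw [bLook, bLook, hfind, hfind2]
              simp only
              have hnotpre : ¬ (('{' :: (t ++ ['}'])) <+: (('{' :: (t0 ++ ['}'])) ++ bGo P r')) := by
                intro hpre
                simp only [List.cons_append, List.append_assoc, List.singleton_append] at hpre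
                have h2 := (List.cons_prefix_cons.mp hpre).2
                exact heq (tok_prefix_eq t t0 (bGo P r') ht ht0bf h2).symm
              rw [List.cons_append]
              rw [repl1_cons_neg _ _ _ _ _ (by
                simpa only [List.cons_append, List.append_assoc, List.singleton_append]
                  using hnotpre)]
              rw [List.append_assoc, List.singleton_append]
              rw [repl1_bf_append _ _ _ ht0bf]
              rw [repl1_rbrace]
              rw [ih r' hr'len (hCtail r' hr'suf)]
              simp
        · -- failed token: '{' is a literal
          rw [bGo_fail P s₁ hcond, bGo_fail _ s₁ hcond]
          have hNPF : ¬ ((t ++ ['}']) <+: bGo P s₁) := by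
            intro hpre
            set t0 := s₁.takeWhile nbChar with ht0def
            have ht0bf : t0.all nbChar = true :=
              List.all_eq_true.mpr (fun x hx => List.mem_takeWhile_imp hx)
            set r := s₁.drop t0.length with hrdef
            have hsplit : s₁ = t0 ++ r := by
              conv_lhs => rw [← List.take_append_drop t0.length s₁]
              rw [take_takeWhile_self, ← ht0def, ← hrdef]
            rw [hsplit, bGo_bf_append P t0 ht0bf] at hpre
            obtain ⟨hpre1, hpre2⟩ := prefix_through_bf t0 t (bGo P r) ht0bf hpre
            set w := t.drop t0.length with hwdef
            have hwbf : w.all nbChar = true := by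
              rw [hwdef]
              exact List.all_eq_true.mpr (fun x hx => List.all_eq_true.mp ht x (List.mem_of_mem_drop hx))
            cases hr : r with
            | nil => rw [hr, bGo_nil] at hpre2; simp at hpre2
            | cons d r₂ =>
              have hd : nbChar d = false := by
                apply head_drop_takeWhile_false nbChar s₁
                rw [← ht0def, ← hrdef, hr]; rfl
              have hd2 : d = '{' ∨ d = '}' := by
                simp [nbChar] at hd
                by_cases h : d = '{'
                · exact Or.inl h
                · exact Or.inr (hd h)
              rcases hd2 with hd2 | hd2
              · subst hd2
                rw [hr] at hpre2
                rcases bGo_brace_cases P r₂ with ⟨t1, u, ht1, ht1ne, hr₂, heq⟩ | heq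
                · rw [heq] at hpre2
                  cases hfind : P.find? (fun p => p.1 == ('{' :: (t1 ++ ['}']))) with
                  | none =>
                    rw [bLook, hfind] at hpre2
                    simp only at hpre2
                    cases hw : w with
                    | nil =>
                      rw [hw] at hpre2
                      simp only [List.nil_append, List.cons_append] at hpre2
                      have := (List.cons_prefix_cons.mp hpre2).1
                      simp at this
                    | cons e w₂ =>
                      rw [hw] at hpre2
                      simp only [List.cons_append] at hpre2
                      have hhd := (List.cons_prefix_cons.mp hpre2).1
                      have : nbChar e = true := by
                        have : e ∈ w := by rw [hw]; simp
                        exact List.all_eq_true.mp hwbf e this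
                      rw [hhd] at this
                      simp [nbChar] at this
                  | some p =>
                    have hmem : p ∈ P := List.mem_of_find?_eq_some hfind
                    have hkey : p.1 = '{' :: (t1 ++ ['}']) := by
                      have := List.find?_some hfind
                      simpa using this
                    rw [bLook, hfind] at hpre2
                    simp only at hpre2
                    have hinfix : ('{' :: (t0 ++ p.1 ++ u)) <:+: ('{' :: s₁) := by
                      rw [hsplit, hr, hr₂, hkey]
                      exact ⟨[], [], by simp⟩
                    have hCp := hC p hmem t0 u ht0bf hinfix
                    apply hCp
                    have hteq : t0 ++ w = t := by
                      conv_rhs => rw [← List.take_append_drop t0.length t]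
                      rw [hwdef]
                      congr 1
                      exact List.prefix_iff_eq_take.mp hpre1
                    rw [← hteq, List.append_assoc]
                    exact (List.prefix_append_right_inj t0).mpr hpre2
                · rw [heq] at hpre2
                  cases hw : w with
                  | nil =>
                    rw [hw] at hpre2
                    simp only [List.nil_append] at hpre2
                    have := (List.cons_prefix_cons.mp hpre2).1
                    simp at this
                  | cons e w₂ =>
                    rw [hw] at hpre2
                    simp only [List.cons_append] at hpre2
                    have hhd := (List.cons_prefix_cons.mp hpre2).1
                    have : nbChar e = true := by
                      have : e ∈ w := by rw [hw]; simp
                      exact List.all_eq_true.mp hwbf e this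
                    rw [hhd] at this
                    simp [nbChar] at this
              · subst hd2
                have ht0nil : t0 = [] := by
                  by_contra h0
                  exact hcond ⟨by rw [hr]; rfl, h0⟩
                have hwt : w = t := by rw [hwdef, ht0nil]; simp
                rw [hwt, hr, bGo_cons_ne P '}' r₂ (by decide)] at hpre2
                cases t with
                | nil => exact htne rfl
                | cons e t₂ =>
                  simp only [List.cons_append] at hpre2
                  have hhd := (List.cons_prefix_cons.mp hpre2).1
                  have : nbChar e = true := by
                    exact List.all_eq_true.mp ht e (by simp)
                  rw [hhd] at this
                  simp [nbChar] at this
          rw [repl1_cons_neg _ _ _ _ _ (by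
            intro hpre
            exact hNPF (List.cons_prefix_cons.mp hpre).2)]
          rw [ih s₁ (by simp at hlen; omega) (hCtail s₁ (List.suffix_cons '{' s₁))]

theorem noPre_of_not_infix (t t0 p2 Y : List Char) (ht0 : t0.all nbChar = true)
    (hp2 : p2.all nbChar = true) (hni : ¬ (p2 <:+: t)) :
    ¬ ((t ++ ['}']) <+: (t0 ++ (p2 ++ Y))) := by
  intro hpre
  obtain ⟨h1, h2⟩ := prefix_through_bf t0 t (p2 ++ Y) ht0 hpre
  obtain ⟨h3, _⟩ := prefix_through_bf p2 (t.drop t0.length) Y hp2 h2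
  exact hni (h3.isInfix.trans (List.drop_suffix t0.length t).isInfix)

def goodB (p : List Char × List Char) : Bool :=
  match p.1 with
  | '{' :: r =>
      !r.dropLast.isEmpty && r.dropLast.all nbChar && (r.dropLast ++ ['}'] == r)
        && p.2.all nbChar && !p.2.isEmpty
  | _ => false

theorem GoodP_of_goodB (p : List Char × List Char) (h : goodB p = true) : GoodP p := by
  unfold goodB at h
  cases hp : p.1 with
  | nil => rw [hp] at h; simp at h
  | cons c r =>
    rw [hp] at h
    by_cases hc : c = '{'
    · subst hc
      simp only [Bool.and_eq_true, beq_iff_eq, Bool.not_eq_true', List.isEmpty_eq_false_iff]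
      at h
      refine ⟨⟨r.dropLast, ?_, h.1.1.1.2, h.1.1.1.1⟩, h.1.2, ?_⟩
      · rw [hp, h.1.1.2]
      · simpa using h.2
    · exfalso
      cases hcc : c <;> rw [hcc] at h <;> simp_all

theorem interior_keyOf (t : List Char) : (('{' :: (t ++ ['}'])).drop 1).dropLast = t := by
  simp

theorem chain (L : List (List Char × List Char)) (hgood : ∀ p ∈ L, GoodP p)
    (hnodup : (L.map Prod.fst).Nodup)
    (hpw : L.Pairwise (fun a b => ¬ (a.2 <:+: (b.1.drop 1).dropLast))) :
    ∀ (Q P : List (List Char × List Char)), P ++ Q = L → ∀ s : List Char,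
      Q.foldl (fun r q => PySem.Chars.replace r q.1 q.2) (bGo P s) = bGo L s := by
  intro Q
  induction Q with
  | nil =>
    intro P hPQ s
    simp only [List.foldl_nil]
    rw [← hPQ]; simp
  | cons q Q' ih =>
    intro P hPQ s
    have hqmem : q ∈ L := by rw [← hPQ]; simp
    obtain ⟨⟨tq, hq1, htqbf, htqne⟩, hq2bf, _⟩ := hgood q hqmem
    have hstep : PySem.Chars.replace (bGo P s) q.1 q.2 = bGo (P ++ [q]) s := by
      rw [hq1, replace_eq_repl1]
      have hki : '{' :: (tq ++ ['}']) = q.1 := hq1.symm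
      have hqeta : ('{' :: (tq ++ ['}']), q.2) = q := by rw [← hq1]
      rw [← hqeta]
      apply REP tq q.2 htqbf htqne hq2bf P
        (fun p hp => hgood p (by rw [← hPQ]; exact List.mem_append_left _ hp))
        ?hnew s.length s le_rfl ?hC
      case hnew =>
        intro p hp hkey
        have hdisj : List.Disjoint (P.map Prod.fst) ((q :: Q').map Prod.fst) := by
          rw [← hPQ, List.map_append] at hnodup
          exact List.disjoint_of_nodup_append hnodup
        exact hdisj (List.mem_map_of_mem hp) (by rw [hkey, hki]; exact List.mem_cons_self ..)
      case hC =>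
        intro p hp t0 u ht0 _
        apply noPre_of_not_infix _ _ _ _ ht0
          (hgood p (by rw [← hPQ]; exact List.mem_append_left _ hp)).2.1
        have hpwPQ : ∀ a ∈ P, ∀ b ∈ q :: Q', ¬ (a.2 <:+: (b.1.drop 1).dropLast) := by
          rw [← hPQ] at hpw
          exact fun a ha b hb => (List.pairwise_append.mp hpw).2.2 a ha b hb
        have := hpwPQ p hp q (List.mem_cons_self ..)
        rw [hq1, interior_keyOf] at this
        exact this
    rw [List.foldl_cons, hstep, ih (P ++ [q]) (by rw [← hPQ]; simp) s]

def T56 : List (List Char × List Char) := bTable.dropLast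
def lastP : List Char × List Char := ("{templateId}".toList, "test-tpl-000".toList)
def ePair : List Char × List Char := ("{entity_type}".toList, "template".toList)

theorem dsplit : bTable = T56 ++ [lastP] := by decide
theorem dgood : ∀ p ∈ bTable, goodB p = true := by decide
theorem dnodup : (bTable.map Prod.fst).Nodup := by decide
theorem dpw : T56.Pairwise (fun a b => ¬ (a.2 <:+: (b.1.drop 1).dropLast)) := by decide
theorem dg4 : ∀ p ∈ T56, p ≠ ePair → ¬ (p.2 <:+: "templateId".toList) := by decide
theorem dg5 : ∀ k : Fin 11, 1 ≤ k.val →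
    ¬ ("template".toList <+: ("templateId".toList.drop k.val)) := by decide
theorem dg6a : ∀ p ∈ T56, ¬ (p.2 <+: ['I','d','}']) ∧ ¬ (['I','d','}'] <+: p.2) := by decide
theorem dg6b : ∀ p ∈ T56, ¬ (p.2 <+: ['d','}']) ∧ ¬ (['d','}'] <+: p.2) := by decide
theorem dg6c : ∀ p ∈ T56, ¬ (p.2 <+: ['}']) ∧ ¬ (['}'] <+: p.2) := by decide

theorem goodT56 : ∀ p ∈ T56, GoodP p := by
  intro p hp
  exact GoodP_of_goodB p (dgood p (by rw [dsplit]; exact List.mem_append_left _ hp))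

-- the special hC hypothesis of REP for the final key {templateId}: A cascade would
-- force the input to contain "{{entity_type}Id}", which ¬D_ rules out
set_option maxRecDepth 8192 in
theorem hC_last (s : List Char) (hD : ¬ ("{{entity_type}Id}".toList <:+: s)) :
    ∀ p ∈ T56, ∀ t0 u, t0.all nbChar = true →
      ('{' :: (t0 ++ p.1 ++ u)) <:+: s →
      ¬ (("templateId".toList ++ ['}']) <+: (t0 ++ (p.2 ++ bGo T56 u))) := by
  intro p hp t0 u ht0 hinf hpre
  by_cases hpe : p = ePair
  · subst hpe
    obtain ⟨h1, h2⟩ := prefix_through_bf t0 "templateId".toList _ ht0 hpre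
    obtain ⟨h3, _⟩ := prefix_through_bf "template".toList
      ("templateId".toList.drop t0.length) (bGo T56 u) (by decide) h2
    have hlen : t0.length ≤ 10 := by
      have := h1.length_le; simpa using this
    have h0 : t0.length = 0 := by
      by_contra hh
      exact dg5 ⟨t0.length, by omega⟩ (by simpa using Nat.pos_of_ne_zero hh) h3
    have ht0nil : t0 = [] := List.eq_nil_of_length_eq_zero h0
    subst ht0nil
    rw [h0] at h2
    simp only [List.drop_zero] at h2
    have h2' : (['I','d','}'] : List Char) <+: bGo T56 u := by
      have he : "templateId".toList ++ ['}'] = "template".toList ++ ['I','d','}'] := by decide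
      rw [he] at h2
      have hep : ePair.2 = "template".toList := rfl
      rw [hep] at h2
      exact (List.prefix_append_right_inj "template".toList).mp h2
    obtain ⟨u1, hu1, hp1⟩ := bGo_prefix_step T56 goodT56 'I' ['d','}'] (by decide) dg6a u h2'
    obtain ⟨u2, hu2, hp2⟩ := bGo_prefix_step T56 goodT56 'd' ['}'] (by decide) dg6b u1 hp1
    obtain ⟨u3, hu3, _⟩ := bGo_prefix_step T56 goodT56 '}' [] (by decide) dg6c u2 hp2
    apply hD
    have hpat : ("{{entity_type}Id}".toList) <+:
        ('{' :: ([] ++ ePair.1 ++ u)) := by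
      rw [hu1, hu2, hu3]
      refine ⟨u3, ?_⟩
      have hdec : "{{entity_type}Id}".toList = '{' :: (ePair.1 ++ ['I','d','}']) := by decide
      rw [hdec]
      simp
    exact hpat.isInfix.trans hinf
  · exact noPre_of_not_infix _ _ _ _ ht0
      (goodT56 p hp).2.1 (dg4 p hp hpe) hpre

theorem foldl_replace_toList : ∀ (L : List (String × String)) (r : String),
    (L.foldl (fun r pv => PySem.Str.replace r pv.1 pv.2) r).toList
      = (L.map (fun p => (p.1.toList, p.2.toList))).foldl
          (fun cs pv => PySem.Chars.replace cs pv.1 pv.2) r.toList := by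
  intro L
  induction L with
  | nil => intro r; simp
  | cons q L' ih =>
    intro r
    simp only [List.foldl_cons, List.map_cons]
    rw [ih, PySem.Str.toList_replace]

theorem main_eq (path : String) (hD : ¬ D_make_testable_path_py path) :
    make_testable_path_py path = make_testable_path_py_alt path := by
  have hDl : ¬ ("{{entity_type}Id}".toList <:+: path.toList) := by
    intro h
    exact hD ((PySem.Str.isIn_iff_infix _ _).mpr h)
  have hchain : List.foldl (fun r q => PySem.Chars.replace r q.1 q.2)
      (bGo [] path.toList) T56 = bGo T56 path.toList := by
    have hg : ∀ p ∈ T56, GoodP p := goodT56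
    have hn : (T56.map Prod.fst).Nodup := by
      have := dnodup; rw [dsplit, List.map_append] at this
      exact (List.nodup_append.mp this).1
    exact chain T56 hg hn dpw T56 [] rfl path.toList
  have hstart : bGo [] path.toList = path.toList :=
    bGo_table_nil path.toList.length path.toList le_rfl
  have hlast : PySem.Chars.replace (bGo T56 path.toList) lastP.1 lastP.2
      = bGo (T56 ++ [lastP]) path.toList := by
    have hkey : lastP.1 = '{' :: ("templateId".toList ++ ['}']) := by decide
    rw [hkey, replace_eq_repl1]
    have heta : ('{' :: ("templateId".toList ++ ['}']), lastP.2) = lastP := by decide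
    have hv2 : lastP.2 = "test-tpl-000".toList := rfl
    rw [← heta, hv2]
    exact REP "templateId".toList "test-tpl-000".toList (by decide) (by decide) (by decide)
      T56 goodT56
      (by
        intro p hp hk
        have hnd := dnodup
        rw [dsplit, List.map_append] at hnd
        have hdisj := List.disjoint_of_nodup_append hnd
        have hk2 : p.1 = lastP.1 := by rw [hk]; decide
        exact hdisj (List.mem_map_of_mem hp) (by simp [hk2])
      )
      path.toList.length path.toList le_rfl (hC_last path.toList hDl)
  have hA : (make_testable_path_py path).toList = bGo bTable path.toList := by
    unfold make_testable_path_py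
    have hitems : (PySem.Dict.mk replPairs).items = replPairs := rfl
    rw [hitems, foldl_replace_toList, tableEq]
    rw [dsplit, List.foldl_append]
    simp only [List.foldl_cons, List.foldl_nil]
    rw [hstart] at hchain
    rw [hchain, hlast]
  rw [make_testable_path_py_alt, ← hA, String.ofList_toList]

theorem nodupT56 : (T56.map Prod.fst).Nodup := by
  have hnd := dnodup
  rw [dsplit, List.map_append] at hnd
  exact (List.nodup_append.mp hnd).1

-- A's result, written with the last key's pass made explicit
theorem atoList (path : String) : (make_testable_path_py path).toList
    = repl1 '{' ("templateId".toList ++ ['}']) "test-tpl-000".toList (bGo T56 path.toList) := by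
  unfold make_testable_path_py
  rw [show (PySem.Dict.mk replPairs).items = replPairs from rfl, foldl_replace_toList]
  rw [tableEq, dsplit, List.foldl_append]
  simp only [List.foldl_cons, List.foldl_nil]
  have hchain := chain T56 goodT56 nodupT56 dpw T56 [] rfl path.toList
  rw [bGo_table_nil path.toList.length path.toList le_rfl] at hchain
  rw [hchain, show lastP.1 = '{' :: ("templateId".toList ++ ['}']) from by decide,
    replace_eq_repl1, show lastP.2 = "test-tpl-000".toList from rfl]

theorem infix_after_bf (p : List Char) :
    ∀ (a r : List Char), a.all nbChar = true → ('{' :: p) <:+: (a ++ r) → ('{' :: p) <:+: r := by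
  intro a
  induction a with
  | nil => intro r _ h; simpa using h
  | cons c a' ih =>
    intro r ha h
    have hc : nbChar c = true := by simp only [List.all_cons, Bool.and_eq_true] at ha; exact ha.1
    have ha' : a'.all nbChar = true := by simp only [List.all_cons, Bool.and_eq_true] at ha; exact ha.2
    rw [List.cons_append] at h
    rcases List.infix_cons_iff.mp h with hp | hi
    · have := (List.cons_prefix_cons.mp hp).1
      simp [nbChar, ← this] at hc
    · exact ih r ha' hi

theorem ktj_facts : ∀ j : Fin 11,
    ("templateId}".toList.drop j.val) ≠ [] ∧
    ¬ ("templateId}".toList.drop j.val <+: "test-tpl-000".toList) := by decide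

theorem PRtrack : ∀ (n : Nat) (X : List Char), X.length ≤ n → ∀ j : Nat, j < 11 →
    ("templateId}".toList.drop j) <+:
      repl1 '{' ("templateId".toList ++ ['}']) "test-tpl-000".toList X →
    ("templateId}".toList.drop j) <+: X := by
  intro n
  induction n with
  | zero =>
    intro X hX j hj hp
    have : X = [] := by cases X <;> simp_all
    subst this
    rw [repl1_nil] at hp
    exact absurd (List.prefix_nil.mp hp) (ktj_facts ⟨j, hj⟩).1
  | succ m ih =>
    intro X hX j hj hp
    cases X with
    | nil =>
      rw [repl1_nil] at hp
      exact absurd (List.prefix_nil.mp hp) (ktj_facts ⟨j, hj⟩).1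
    | cons c X' =>
      rw [repl1] at hp
      by_cases hm : (('{' :: ("templateId".toList ++ ['}'])).isPrefixOf (c :: X')) = true
      · rw [if_pos hm] at hp
        have hlen : ("templateId}".toList.drop j).length ≤ "test-tpl-000".toList.length := by
          have : ("templateId}".toList.drop j).length ≤ 11 := by simp
          simpa using by omega
        have : ("templateId}".toList.drop j) <+: "test-tpl-000".toList :=
          List.prefix_of_prefix_length_le hp (List.prefix_append _ _) hlen
        exact absurd this (ktj_facts ⟨j, hj⟩).2
      · rw [if_neg hm] at hp
        have hkt : "templateId}".toList.drop j
            = "templateId}".toList[j] :: "templateId}".toList.drop (j+1) := by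
          exact List.drop_eq_getElem_cons (by simp; omega)
        rw [hkt] at hp
        have h2 := List.cons_prefix_cons.mp hp
        by_cases hj1 : j + 1 < 11
        · have := ih X' (by simp at hX; omega) (j+1) hj1 h2.2
          rw [hkt]
          exact List.cons_prefix_cons.mpr ⟨h2.1, this⟩
        · have hj10 : j = 10 := by omega
          subst hj10
          rw [hkt]
          refine List.cons_prefix_cons.mpr ⟨h2.1, ?_⟩
          have : "templateId}".toList.drop 11 = [] := by decide
          rw [this]
          exact List.nil_prefix

theorem NoK : ∀ (n : Nat) (X : List Char), X.length ≤ n →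
    ¬ ("{templateId}".toList <:+:
        repl1 '{' ("templateId".toList ++ ['}']) "test-tpl-000".toList X) := by
  intro n
  induction n with
  | zero =>
    intro X hX h
    have : X = [] := by cases X <;> simp_all
    subst this
    rw [repl1_nil] at h
    have := List.eq_nil_of_infix_nil h
    simp at this
  | succ m ih =>
    intro X hX h
    cases X with
    | nil =>
      rw [repl1_nil] at h
      have := List.eq_nil_of_infix_nil h
      simp at this
    | cons c X' =>
      rw [repl1] at h
      by_cases hm : (('{' :: ("templateId".toList ++ ['}'])).isPrefixOf (c :: X')) = true
      · rw [if_pos hm] at h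
        have h2 : "{templateId}".toList <:+:
            repl1 '{' ("templateId".toList ++ ['}']) "test-tpl-000".toList
              (X'.drop ("templateId".toList ++ ['}']).length) := by
          have hk : "{templateId}".toList = '{' :: "templateId}".toList := by decide
          rw [hk] at h ⊢
          exact infix_after_bf _ "test-tpl-000".toList _ (by decide) h
        exact ih _ (by simp at hX ⊢; omega) h2
      · rw [if_neg hm] at h
        have hk : "{templateId}".toList = '{' :: "templateId}".toList := by decide
        rcases List.infix_cons_iff.mp h with hp | hi
        · rw [hk] at hp
          have h2 := List.cons_prefix_cons.mp hp
          have h3 : "templateId}".toList.drop 0 <+: X' := by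
            apply PRtrack m X' (by simp at hX; omega) 0 (by omega)
            simpa using h2.2
          apply hm
          rw [List.isPrefixOf_iff_prefix]
          refine List.cons_prefix_cons.mpr ⟨h2.1, ?_⟩
          have : "templateId".toList ++ ['}'] = "templateId}".toList := by decide
          rw [this]
          simpa using h3
        · exact ih X' (by simp at hX; omega) hi

theorem infix_lift_left (x pre r : List Char) (h : x <:+: r) : x <:+: pre ++ r :=
  h.trans (List.suffix_append pre r).isInfix

theorem infix_lift_cons (x : List Char) (c : Char) (r : List Char) (h : x <:+: r) :
    x <:+: c :: r :=
  infix_lift_left x [c] r h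

theorem Bcontains : ∀ (n : Nat) (s : List Char), s.length ≤ n →
    "{{entity_type}Id}".toList <:+: s →
    "{templateId}".toList <:+: bGo bTable s := by
  intro n
  induction n with
  | zero =>
    intro s hs h
    have : s = [] := by cases s <;> simp_all
    subst this
    have := List.eq_nil_of_infix_nil h
    simp at this
  | succ m ih =>
    intro s hs h
    cases s with
    | nil =>
      have := List.eq_nil_of_infix_nil h
      simp at this
    | cons c s' =>
      rcases List.infix_cons_iff.mp h with hp | hi
      · -- the pattern sits right here
        have hc : c = '{' := by
          have hk : "{{entity_type}Id}".toList = '{' :: "{entity_type}Id}".toList := by decide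
          rw [hk] at hp
          exact (List.cons_prefix_cons.mp hp).1.symm
        subst hc
        have hp2 : "{entity_type}Id}".toList <+: s' := by
          have hk : "{{entity_type}Id}".toList = '{' :: "{entity_type}Id}".toList := by decide
          rw [hk] at hp
          exact (List.cons_prefix_cons.mp hp).2
        obtain ⟨y, hy⟩ := hp2
        have hs' : s' = '{' :: ("entity_type".toList ++ '}' :: ('I' :: 'd' :: '}' :: y)) := by
          rw [← hy]
          have hbase : "{entity_type}Id}".toList
              = '{' :: ("entity_type".toList ++ '}' :: ('I' :: 'd' :: '}' :: [])) := by decide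
          rw [hbase]
          simp
        have hfail : bGo bTable ('{' :: s') = '{' :: bGo bTable s' := by
          apply bGo_fail
          rw [hs']
          simp [List.takeWhile_cons, nbChar]
        rw [hfail, hs', bGo_succ _ _ _ (by decide) (by decide)]
        have hlook : bLook bTable ('{' :: ("entity_type".toList ++ ['}']))
            = "template".toList := by decide
        rw [hlook, bGo_cons_ne _ _ _ (by decide), bGo_cons_ne _ _ _ (by decide),
          bGo_cons_ne _ _ _ (by decide)]
        refine ⟨[], ?_⟩
        refine ⟨bGo bTable y, ?_⟩
        have hkk : "{templateId}".toList
            = '{' :: ("template".toList ++ ['I', 'd', '}']) := by decide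
        rw [hkk]
        simp
      · -- the pattern lies in the tail
        by_cases hc : c = '{'
        · subst hc
          rcases bGo_brace_cases bTable s' with ⟨t0, r', ht0, ht0ne, hrest, heq⟩ | heq
          · rw [heq]
            have hir : "{{entity_type}Id}".toList <:+: r' := by
              rw [hrest] at hi
              have hk : "{{entity_type}Id}".toList = '{' :: "{entity_type}Id}".toList := by
                decide
              rw [hk] at hi ⊢
              have h2 := infix_after_bf _ t0 _ ht0 hi
              rcases List.infix_cons_iff.mp h2 with hp2 | hi2
              · exact absurd (List.cons_prefix_cons.mp hp2).1.symm (by decide)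
              · exact hi2
            have hr'len : r'.length ≤ m := by rw [hrest] at hs; simp at hs; omega
            exact infix_lift_left _ _ _ (ih r' hr'len hir)
          · rw [heq]
            exact infix_lift_cons _ _ _ (ih s' (by simp at hs; omega) hi)
        · rw [bGo_cons_ne _ _ _ hc]
          exact infix_lift_cons _ _ _ (ih s' (by simp at hs; omega) hi)

set_option maxRecDepth 100000 in
theorem bwitness : bGo bTable "{{entity_type}Id}".toList = "{templateId}".toList := by
  have h0 : "{{entity_type}Id}".toList = '{' :: "{entity_type}Id}".toList := by decide
  rw [h0, bGo_fail _ _ (by decide)]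
  have h1 : "{entity_type}Id}".toList
      = '{' :: ("entity_type".toList ++ '}' :: "Id}".toList) := by decide
  rw [h1, bGo_succ _ _ _ (by decide) (by decide)]
  have h2 : bLook bTable ('{' :: ("entity_type".toList ++ ['}'])) = "template".toList := by
    decide
  rw [h2]
  have h3 : "Id}".toList = 'I' :: 'd' :: '}' :: [] := by decide
  rw [h3, bGo_cons_ne _ _ _ (by decide), bGo_cons_ne _ _ _ (by decide),
    bGo_cons_ne _ _ _ (by decide), bGo_nil]
  decide

set_option maxRecDepth 400000 in
theorem awitness : (make_testable_path_py "{{entity_type}Id}").toList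
    = "test-tpl-000".toList := by
  unfold make_testable_path_py
  rw [show (PySem.Dict.mk replPairs).items = replPairs from rfl, foldl_replace_toList]
  decide

-- ===== VERDICT (by name: the statement is the Claim_ definition above) =====
theorem make_testable_path_py_spec : Claim_unchanged_make_testable_path_py := by
  intro path _ hD
  exact main_eq path hD

theorem make_testable_path_py_changed : Claim_changed_make_testable_path_py := by
  unfold Claim_changed_make_testable_path_py
  refine ⟨by decide, by decide, ?_, ?_, by decide⟩
  · show make_testable_path_py "{{entity_type}Id}" = "test-tpl-000"
    have h := congrArg String.ofList awitness
    rwa [String.ofList_toList, String.ofList_toList] at h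
  · show make_testable_path_py_alt "{{entity_type}Id}" = "{templateId}"
    unfold make_testable_path_py_alt
    rw [show ("{{entity_type}Id}" : String).toList = "{{entity_type}Id}".toList from rfl,
      bwitness, String.ofList_toList]

theorem make_testable_path_py_tight : Claim_exact_make_testable_path_py := by
  intro path _ hD heq
  have hDl : "{{entity_type}Id}".toList <:+: path.toList :=
    (PySem.Str.isIn_iff_infix _ _).mp hD
  have hB : "{templateId}".toList <:+: (make_testable_path_py_alt path).toList := by
    unfold make_testable_path_py_alt
    have hofl : (String.ofList (bGo bTable path.toList)).toList = bGo bTable path.toList :=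
      String.toList_ofList
    rw [hofl]
    exact Bcontains path.toList.length path.toList le_rfl hDl
  rw [← heq, atoList] at hB
  exact NoK (bGo T56 path.toList).length _ le_rfl hB
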